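-- pv_equiv track=rewrite | github.com/dgsim126/Algo_Study_2 | Programmers/심동근/250305/Magnetic.py | solution
-- ===== SOURCE A (Python) =====
-- from collections import deque
--
-- def solution(n, board):
--     result= 0
--     for i in range(n):
--         lst= deque()
--         for j in range(n):
--             if(board[j][i]==1 or board[j][i]==2):
--                 lst.append(board[j][i])
--
--         while(len(lst)>1):
--             if(lst[0]==1 and lst[1]==2):
--                 lst.popleft()
--                 lst.popleft()
--                 result+=1
--             else:
--                 lst.popleft()
--
--     return result
-- ===== SOURCE B (Python) =====
-- def solution(n, board):
--     # One top-to-bottom pass per column with a single pending flag (no deque, no drain loop).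
--     result = 0
--     for i in range(n):
--         pending = False
--         for j in range(n):
--             v = board[j][i]
--             if v == 1:
--                 pending = True
--             elif v == 2 and pending:
--                 result += 1
--                 pending = False
--     return result
-- ===== Notes on version B (the rewrite author's own statement) =====
-- stated objective: simpler
-- what changed: Per column, the build-a-deque-then-drain two-phase loop is replaced by a single top-to-bottom pass keeping one boolean pending flag; the deque and its popleft drain loop disappear.
import Mathlib
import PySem

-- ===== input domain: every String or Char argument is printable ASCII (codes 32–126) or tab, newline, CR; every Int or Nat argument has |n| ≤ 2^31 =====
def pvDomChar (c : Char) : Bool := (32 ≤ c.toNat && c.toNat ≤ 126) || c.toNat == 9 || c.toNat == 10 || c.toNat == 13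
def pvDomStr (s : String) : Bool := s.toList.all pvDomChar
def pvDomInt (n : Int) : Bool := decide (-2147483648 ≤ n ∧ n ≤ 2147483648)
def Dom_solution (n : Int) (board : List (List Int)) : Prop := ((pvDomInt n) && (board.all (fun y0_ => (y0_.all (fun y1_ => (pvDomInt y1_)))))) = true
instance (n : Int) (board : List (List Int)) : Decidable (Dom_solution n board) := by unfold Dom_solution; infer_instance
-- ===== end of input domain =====

-- B replaces A's per-column build-a-deque-then-drain two-phase loop by one pass with a single pending flag (objective: simpler).

-- ===== PORT A =====
-- board[j][i] (indices are always in range inside Pre_solution; default 0 outside it)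
def cellA (board : List (List Int)) (j i : Int) : Int :=
  PySem.List.pyGetD (PySem.List.pyGetD board j []) i 0

-- A's 'while len(lst)>1' drain loop over the deque, carrying 'result'
def drainA : List Int → Int → Int
  | a :: b :: t, result =>
      if a = 1 ∧ b = 2 then drainA t (result + 1) else drainA (b :: t) result
  | _, result => result
termination_by l _ => l.length

def solution (n : Int) (board : List (List Int)) : Int :=
  (PySem.List.pyRange 0 n 1).foldl (fun result i =>
    drainA
      ((PySem.List.pyRange 0 n 1).foldl (fun lst j =>
        if cellA board j i = 1 ∨ cellA board j i = 2 then lst ++ [cellA board j i] else lst) [])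
      result) 0

-- ===== PORT B =====
def cellB (board : List (List Int)) (j i : Int) : Int :=
  PySem.List.pyGetD (PySem.List.pyGetD board j []) i 0

def solution_alt (n : Int) (board : List (List Int)) : Int :=
  (PySem.List.pyRange 0 n 1).foldl (fun result i =>
    ((PySem.List.pyRange 0 n 1).foldl (fun (st : Bool × Int) j =>
        let v := cellB board j i
        if v = 1 then (true, st.2)
        else if v = 2 ∧ st.1 then (false, st.2 + 1)
        else st) (false, result)).2) 0

-- ===== PRECONDITION & SPEC =====
-- Pre_: exactly the inputs where A's accesses board[j][i] (j,i < n) stay in range, i.e. A raises no IndexError.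
def Pre_solution (n : Int) (board : List (List Int)) : Prop :=
  n ≤ 0 ∨ (n ≤ (board.length : Int) ∧ ∀ row ∈ board.take n.toNat, n ≤ (row.length : Int))
instance (n : Int) (board : List (List Int)) : Decidable (Pre_solution n board) := by
  unfold Pre_solution; infer_instance
def pvWitness_solution : Int × List (List Int) := (2, [[1, 0], [2, 2]])
def Spec_solution (n : Int) (board : List (List Int)) (out : Int) : Prop := out = solution_alt n board
instance (n : Int) (board : List (List Int)) (out : Int) : Decidable (Spec_solution n board out) := by unfold Spec_solution; infer_instance

-- ===== CLAIM (what is proved, stated in full; the proofs are below) =====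
def Claim_equal_solution : Prop := ∀ (n : Int) (board : List (List Int)), Dom_solution n board → Pre_solution n board → Spec_solution n board (solution n board)

-- ===== LEMMAS AND PROOFS =====
-- B's per-column loop body, as a fold over the list of seen 1/2 values
def pendP (l : List Int) (st : Bool × Int) : Bool × Int :=
  l.foldl (fun st v =>
    if v = 1 then (true, st.2)
    else if v = 2 ∧ st.1 then (false, st.2 + 1)
    else st) st

theorem cellB_eq_cellA : cellB = cellA := rfl

theorem lstA_acc (board : List (List Int)) (i : Int) (js : List Int) :
    ∀ (acc : List Int),
      js.foldl (fun lst j => if cellA board j i = 1 ∨ cellA board j i = 2 then lst ++ [cellA board j i] else lst) acc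
        = acc ++ js.foldl (fun lst j => if cellA board j i = 1 ∨ cellA board j i = 2 then lst ++ [cellA board j i] else lst) [] := by
  induction js with
  | nil => intro acc; simp
  | cons j t ih =>
      intro acc
      by_cases h : cellA board j i = 1 ∨ cellA board j i = 2
      · simp only [List.foldl_cons, if_pos h, List.nil_append]
        rw [ih (acc ++ [cellA board j i]), ih [cellA board j i]]
        simp
      · simp only [List.foldl_cons, if_neg h, List.nil_append]
        exact ih acc

theorem mem_lstA (board : List (List Int)) (i : Int) (js : List Int) :
    ∀ (acc : List Int), (∀ x ∈ acc, x = 1 ∨ x = 2) →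
      ∀ x ∈ js.foldl (fun lst j => if cellA board j i = 1 ∨ cellA board j i = 2 then lst ++ [cellA board j i] else lst) acc,
        x = 1 ∨ x = 2 := by
  induction js with
  | nil => intro acc hacc x hx; exact hacc x hx
  | cons j t ih =>
      intro acc hacc x hx
      simp only [List.foldl_cons] at hx
      by_cases h : cellA board j i = 1 ∨ cellA board j i = 2
      · rw [if_pos h] at hx
        refine ih _ ?_ x hx
        intro y hy
        rcases List.mem_append.1 hy with hy | hy
        · exact hacc y hy
        · simp at hy; subst hy; exact h
      · rw [if_neg h] at hx
        exact ih acc hacc x hx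

theorem colB_eq (board : List (List Int)) (i : Int) (js : List Int) :
    ∀ (st : Bool × Int),
      js.foldl (fun (st : Bool × Int) j =>
          let v := cellB board j i
          if v = 1 then (true, st.2)
          else if v = 2 ∧ st.1 then (false, st.2 + 1)
          else st) st
        = pendP (js.foldl (fun lst j => if cellA board j i = 1 ∨ cellA board j i = 2 then lst ++ [cellA board j i] else lst) []) st := by
  induction js with
  | nil => intro st; simp [pendP]
  | cons j t ih =>
      intro st
      simp only [List.foldl_cons]
      rw [lstA_acc]
      by_cases h : cellA board j i = 1 ∨ cellA board j i = 2
      · rw [if_pos h]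
        rw [ih]
        simp only [pendP, List.foldl_append, List.nil_append, List.foldl_cons, List.foldl_nil,
          cellB_eq_cellA]
        rfl
      · rw [if_neg h]
        rw [ih]
        push Not at h
        simp only [cellB_eq_cellA, h.1, h.2, if_false, false_and, List.nil_append]

theorem drain_eq_pend : ∀ (l : List Int) (r : Int), (∀ x ∈ l, x = 1 ∨ x = 2) →
    drainA l r = (pendP l (false, r)).2 := by
  intro l r
  induction l, r using drainA.induct with
  | case1 a b t result h ih =>
      intro hm
      rw [drainA, if_pos h]
      rw [ih (fun x hx => hm x (List.mem_cons_of_mem _ (List.mem_cons_of_mem _ hx)))]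
      obtain ⟨ha, hb⟩ := h
      subst ha; subst hb
      simp [pendP, List.foldl_cons]
  | case2 a b t result h ih =>
      intro hm
      rw [drainA, if_neg h]
      rw [ih (fun x hx => hm x (List.mem_cons_of_mem _ hx))]
      have ha := hm a (by simp)
      rcases ha with ha | ha
      · subst ha
        have hb : b = 1 := by
          rcases hm b (by simp) with hb | hb
          · exact hb
          · exact absurd ⟨rfl, hb⟩ h
        subst hb
        simp [pendP, List.foldl_cons]
      · subst ha
        simp [pendP, List.foldl_cons]
  | case3 l result h =>
      intro hm
      cases l with
      | nil => simp [drainA, pendP]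
      | cons x t =>
          cases t with
          | nil =>
              rcases hm x (by simp) with hx | hx <;> subst hx <;> simp [drainA, pendP]
          | cons y t2 => exact (h x y t2 rfl).elim

-- ===== VERDICT (by name: the statement is the Claim_ definition above) =====
theorem solution_spec : Claim_equal_solution := by
  intro n board _ _
  unfold Spec_solution solution solution_alt
  refine Eq.symm (PySem.List.foldl_congr_mem _ _ _ _ ?_)
  intro result i _
  rw [colB_eq]
  rw [drain_eq_pend _ result (mem_lstA board i _ [] (by simp))]
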